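-- pv_equiv track=rewrite | github.com/jackbaum33/dynasty-simulator | fantasy_football_simulator.py | simulate_season
-- ===== SOURCE A (Python) =====
-- def simulate_season(teams_scores, schedule):
--     """
--     Simulate a single season given team scores and a schedule.
--     Returns a dictionary of team records {team_name: (wins, losses)}
--     """
--     records = {team: [0, 0] for team in teams_scores.keys()}  # [wins, losses]
--
--     for week_num, week_matchups in enumerate(schedule):
--         for team1, team2 in week_matchups:
--             score1 = teams_scores[team1][week_num]
--             score2 = teams_scores[team2][week_num]
--
--             if score1 > score2:
--                 records[team1][0] += 1  # team1 wins
--                 records[team2][1] += 1  # team2 loses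
--             else:
--                 records[team2][0] += 1  # team2 wins
--                 records[team1][1] += 1  # team1 loses
--
--     # Convert to tuples (wins, losses)
--     return {team: tuple(record) for team, record in records.items()}
-- ===== SOURCE B (Python) =====
-- def simulate_season(teams_scores, schedule):
--     """
--     Simulate a single season given team scores and a schedule.
--     Returns a dictionary of team records {team_name: (wins, losses)}
--     """
--     result = {}
--     for team in teams_scores:
--         wins = 0
--         losses = 0
--         for week_num, week_matchups in enumerate(schedule):
--             for t1, t2 in week_matchups:
--                 if t1 != team and t2 != team:
--                     continue
--                 team1_wins = teams_scores[t1][week_num] > teams_scores[t2][week_num]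
--                 if t1 == team:
--                     if team1_wins:
--                         wins += 1
--                     else:
--                         losses += 1
--                 if t2 == team:
--                     if team1_wins:
--                         losses += 1
--                     else:
--                         wins += 1
--         result[team] = (wins, losses)
--     return result
-- ===== Notes on version B (the rewrite author's own statement) =====
-- stated objective: alternative
-- what changed: A makes one match-major pass over the schedule mutating a shared per-team [wins, losses] dict; B is team-major: for each team of teams_scores it rescans the whole schedule independently, counting that team's wins and losses from its own perspective (win as team1 iff score1 > score2, win as team2 iff not), with no shared accumulator across teams.
import Mathlib
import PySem

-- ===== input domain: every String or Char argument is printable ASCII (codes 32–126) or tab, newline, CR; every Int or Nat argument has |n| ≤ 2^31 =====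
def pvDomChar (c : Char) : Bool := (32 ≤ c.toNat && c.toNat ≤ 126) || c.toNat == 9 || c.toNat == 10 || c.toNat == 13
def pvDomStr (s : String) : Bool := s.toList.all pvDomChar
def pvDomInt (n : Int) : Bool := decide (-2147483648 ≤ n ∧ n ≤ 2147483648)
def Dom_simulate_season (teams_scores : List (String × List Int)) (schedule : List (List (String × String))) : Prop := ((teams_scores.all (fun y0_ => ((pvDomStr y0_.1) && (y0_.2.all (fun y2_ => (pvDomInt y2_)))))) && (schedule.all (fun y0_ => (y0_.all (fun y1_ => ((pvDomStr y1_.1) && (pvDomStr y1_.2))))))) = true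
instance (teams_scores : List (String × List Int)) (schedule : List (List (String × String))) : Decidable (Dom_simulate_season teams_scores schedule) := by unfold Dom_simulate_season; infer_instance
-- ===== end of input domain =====

-- A makes one match-major pass mutating a shared per-team [wins, losses] dict; B is team-major:
-- each team independently rescans the whole schedule counting its own wins and losses
-- (objective: alternative decomposition, no shared accumulator).

-- ===== PORT A =====
-- one matchup of week `w`: look up both scores, credit a win and a loss (tie goes to team2)
def stepA (tsd : PySem.Dict String (List Int)) (w : Int)
    (recs : PySem.Dict String (Int × Int)) (m : String × String) : PySem.Dict String (Int × Int) :=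
  let score1 := PySem.List.pyGetD (tsd.getD m.1 []) w 0
  let score2 := PySem.List.pyGetD (tsd.getD m.2 []) w 0
  if score1 > score2 then
    (recs.modify m.1 (0, 0) (fun r => (r.1 + 1, r.2))).modify m.2 (0, 0) (fun r => (r.1, r.2 + 1))
  else
    (recs.modify m.2 (0, 0) (fun r => (r.1 + 1, r.2))).modify m.1 (0, 0) (fun r => (r.1, r.2 + 1))

def simulate_season (teams_scores : List (String × List Int)) (schedule : List (List (String × String))) : List (String × Int × Int) :=
  let tsd : PySem.Dict String (List Int) := PySem.Dict.ofList teams_scores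
  let records0 : PySem.Dict String (Int × Int) :=
    tsd.keys.foldl (fun d t => d.insert t (0, 0)) PySem.Dict.empty
  let records :=
    (PySem.List.enumerate schedule).foldl
      (fun recs wk => wk.2.foldl (stepA tsd wk.1) recs) records0
  records.items

-- ===== PORT B =====
-- one matchup of week `w`, from `team`'s own perspective: skip if the team is not in it,
-- else bump this team's (wins, losses) according to whether team1 wins
def stepB (tsd : PySem.Dict String (List Int)) (team : String) (w : Int)
    (p : Int × Int) (m : String × String) : Int × Int :=
  if m.1 ≠ team ∧ m.2 ≠ team then p
  else
    let team1_wins := PySem.List.pyGetD (tsd.getD m.1 []) w 0 > PySem.List.pyGetD (tsd.getD m.2 []) w 0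
    let p := if m.1 = team then (if team1_wins then (p.1 + 1, p.2) else (p.1, p.2 + 1)) else p
    let p := if m.2 = team then (if team1_wins then (p.1, p.2 + 1) else (p.1 + 1, p.2)) else p
    p

def teamRecord (tsd : PySem.Dict String (List Int)) (schedule : List (List (String × String)))
    (team : String) : Int × Int :=
  (PySem.List.enumerate schedule).foldl
    (fun p wk => wk.2.foldl (stepB tsd team wk.1) p) (0, 0)

def simulate_season_alt (teams_scores : List (String × List Int)) (schedule : List (List (String × String))) : List (String × Int × Int) :=
  let tsd : PySem.Dict String (List Int) := PySem.Dict.ofList teams_scores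
  tsd.keys.map (fun t => (t, teamRecord tsd schedule t))

-- ===== PRECONDITION & SPEC =====
-- Pre_ excludes exactly the inputs on which Python A raises: a scheduled team missing from
-- teams_scores (KeyError) or a week index beyond that team's score list (IndexError).
def Pre_simulate_season (teams_scores : List (String × List Int)) (schedule : List (List (String × String))) : Prop :=
  ∀ wk ∈ PySem.List.enumerate schedule, ∀ m ∈ wk.2,
    ((PySem.Dict.ofList teams_scores).contains m.1 = true ∧
      wk.1 < (((PySem.Dict.ofList teams_scores).getD m.1 []).length : Int)) ∧
    ((PySem.Dict.ofList teams_scores).contains m.2 = true ∧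
      wk.1 < (((PySem.Dict.ofList teams_scores).getD m.2 []).length : Int))
instance (teams_scores : List (String × List Int)) (schedule : List (List (String × String))) : Decidable (Pre_simulate_season teams_scores schedule) := by unfold Pre_simulate_season; infer_instance

def pvWitness_simulate_season : (List (String × List Int)) × (List (List (String × String))) :=
  ([("A", [3]), ("B", [1])], [[("A", "B")]])

def Spec_simulate_season (teams_scores : List (String × List Int)) (schedule : List (List (String × String))) (out : List (String × Int × Int)) : Prop := out = simulate_season_alt teams_scores schedule
instance (teams_scores : List (String × List Int)) (schedule : List (List (String × String))) (out : List (String × Int × Int)) : Decidable (Spec_simulate_season teams_scores schedule out) := by unfold Spec_simulate_season; infer_instance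

-- ===== CLAIM =====
def Claim_equal_simulate_season : Prop := ∀ (teams_scores : List (String × List Int)) (schedule : List (List (String × String))), Dom_simulate_season teams_scores schedule → Pre_simulate_season teams_scores schedule → Spec_simulate_season teams_scores schedule (simulate_season teams_scores schedule)

-- ===== LEMMAS AND PROOFS =====

-- the simulation relation: A's record dict lists, in key order, exactly the per-team pairs F
def RecRel (K : List String) (recs : PySem.Dict String (Int × Int)) (F : String → Int × Int) : Prop :=
  recs.items = K.map (fun t => (t, F t))

lemma items_modify_map (K : List String) (hK : K.Nodup) (d : PySem.Dict String (Int × Int))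
    (φ : String → Int × Int) (hd : d.items = K.map (fun t => (t, φ t)))
    {k : String} (hk : k ∈ K) (f : Int × Int → Int × Int) :
    (d.modify k (0, 0) f).items = K.map (fun t => (t, if t = k then f (φ t) else φ t)) := by
  have hnd : d.keys.Nodup := by
    have : d.keys = K := by
      simp [PySem.Dict.keys, hd, List.map_map]
      exact List.map_congr_left (fun t _ => rfl) |>.trans (List.map_id K)
    rw [this]; exact hK
  have hmem : (k, φ k) ∈ d.items := by
    rw [hd]; exact List.mem_map.2 ⟨k, hk, rfl⟩
  have hget : d.getD k (0, 0) = φ k := PySem.Dict.getD_of_mem_items d hmem hnd (0, 0)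
  have hcont : d.contains k = true := by
    rw [PySem.Dict.contains_iff_mem_keys]
    exact PySem.Dict.mem_keys_of_mem_items d hmem
  show (d.insert k (f (d.getD k (0, 0)))).items = _
  rw [PySem.Dict.items_insert_of_contains d _ hcont, hget, hd, List.map_map]
  refine List.map_congr_left (fun t ht => ?_)
  by_cases h : t = k <;> simp [Function.comp, h]

-- one matchup: A's two dict modifications act pointwise as B's per-team step
lemma stepA_rel (tsd : PySem.Dict String (List Int)) (K : List String) (hK : K.Nodup)
    (w : Int) (m : String × String) (h1 : m.1 ∈ K) (h2 : m.2 ∈ K)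
    (recs : PySem.Dict String (Int × Int)) (F : String → Int × Int)
    (hrel : RecRel K recs F) :
    RecRel K (stepA tsd w recs m) (fun t => stepB tsd t w (F t) m) := by
  unfold RecRel at hrel ⊢
  unfold stepA
  by_cases hs : PySem.List.pyGetD (tsd.getD m.1 []) w 0 > PySem.List.pyGetD (tsd.getD m.2 []) w 0
  · simp only [hs, if_pos]
    rw [items_modify_map K hK _ _
        (items_modify_map K hK _ _ hrel h1 (fun r => (r.1 + 1, r.2))) h2 (fun r => (r.1, r.2 + 1))]
    refine List.map_congr_left (fun t ht => ?_)
    unfold stepB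
    by_cases e1 : m.1 = t <;> by_cases e2 : m.2 = t <;>
      simp_all [eq_comm]
  · simp only [hs, if_false]
    rw [items_modify_map K hK _ _
        (items_modify_map K hK _ _ hrel h2 (fun r => (r.1 + 1, r.2))) h1 (fun r => (r.1, r.2 + 1))]
    refine List.map_congr_left (fun t ht => ?_)
    unfold stepB
    by_cases e1 : m.1 = t <;> by_cases e2 : m.2 = t <;>
      simp_all [eq_comm]

lemma foldl_inner_rel (tsd : PySem.Dict String (List Int)) (K : List String) (hK : K.Nodup)
    (w : Int) (ms : List (String × String)) (hmem : ∀ m ∈ ms, m.1 ∈ K ∧ m.2 ∈ K)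
    (recs : PySem.Dict String (Int × Int)) (F : String → Int × Int)
    (hrel : RecRel K recs F) :
    RecRel K (ms.foldl (stepA tsd w) recs) (fun t => ms.foldl (stepB tsd t w) (F t)) := by
  induction ms generalizing recs F with
  | nil => exact hrel
  | cons m ms ih =>
    obtain ⟨h1, h2⟩ := hmem m (List.mem_cons_self)
    exact ih (fun x hx => hmem x (List.mem_cons_of_mem m hx)) _ _
      (stepA_rel tsd K hK w m h1 h2 recs F hrel)

lemma foldl_outer_rel (tsd : PySem.Dict String (List Int)) (K : List String) (hK : K.Nodup)
    (L : List (Int × List (String × String)))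
    (hmem : ∀ wk ∈ L, ∀ m ∈ wk.2, m.1 ∈ K ∧ m.2 ∈ K)
    (recs : PySem.Dict String (Int × Int)) (F : String → Int × Int)
    (hrel : RecRel K recs F) :
    RecRel K (L.foldl (fun recs wk => wk.2.foldl (stepA tsd wk.1) recs) recs)
      (fun t => L.foldl (fun p wk => wk.2.foldl (stepB tsd t wk.1) p) (F t)) := by
  induction L generalizing recs F with
  | nil => exact hrel
  | cons wk L ih =>
    exact ih (fun x hx => hmem x (List.mem_cons_of_mem wk hx)) _ _
      (foldl_inner_rel tsd K hK wk.1 wk.2 (hmem wk List.mem_cons_self) recs F hrel)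

lemma records0_rel (tsd : PySem.Dict String (List Int)) (hK : tsd.keys.Nodup) :
    RecRel tsd.keys (tsd.keys.foldl (fun d t => d.insert t (0, 0)) PySem.Dict.empty)
      (fun _ => (0, 0)) := by
  unfold RecRel
  have := PySem.Dict.items_foldl_insert_fresh (ν := Int × Int) tsd.keys id (fun _ => (0, 0))
    PySem.Dict.empty (fun a _ => PySem.Dict.contains_empty a) (by simpa using hK)
  simp only [id] at this
  rw [this]
  have he : (PySem.Dict.empty : PySem.Dict String (Int × Int)).items = [] := rfl
  rw [he]
  simp

-- ===== VERDICT =====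
theorem simulate_season_spec : Claim_equal_simulate_season := by
  intro teams_scores schedule _hDom hPre
  unfold Spec_simulate_season simulate_season simulate_season_alt
  have hK : (PySem.Dict.ofList teams_scores).keys.Nodup :=
    PySem.Dict.nodup_keys_ofList teams_scores
  have hmem : ∀ wk ∈ PySem.List.enumerate schedule, ∀ m ∈ wk.2,
      m.1 ∈ (PySem.Dict.ofList teams_scores).keys ∧ m.2 ∈ (PySem.Dict.ofList teams_scores).keys := by
    intro wk hwk m hm
    obtain ⟨⟨c1, _⟩, ⟨c2, _⟩⟩ := hPre wk hwk m hm
    exact ⟨(PySem.Dict.contains_iff_mem_keys _ _).1 c1, (PySem.Dict.contains_iff_mem_keys _ _).1 c2⟩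
  have h := foldl_outer_rel (PySem.Dict.ofList teams_scores) _ hK _ hmem _ _
    (records0_rel _ hK)
  unfold RecRel at h
  simpa [teamRecord] using h
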